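-- pv_equiv track=rewrite | github.com/Blaze-F/-python-java- | Python/Solved/random_combination.py | originate
-- ===== SOURCE A (Python) =====
-- from typing import Dict
--
-- def originate(
--     members: list, count_of_team: int, num_of_people: int, lack_of_people: int
-- ) -> Dict[str, list]:
--     """팀을 구성합니다
--
--     Returns:
--         _type_: Dict[str, list]"""
--     return_dict = {}
--
--     for i in range(1, count_of_team + 1):
--         # 맞아떨어질 경우
--         if lack_of_people == 0:
--             return_dict[f"{i}팀"] = members[0:num_of_people]
--             del members[0:num_of_people]
--
--         # 남은 인원이 있을경우
--         else:
--             # 마지막 팀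
--             if i == count_of_team:
--                 return_dict[f"{i}팀"] = members
--                 break
--
--             # 인원 차출
--             elif i >= (count_of_team - lack_of_people):
--                 return_dict[f"{i}팀"] = members[0 : num_of_people - 1]
--                 del members[0 : num_of_people - 1]
--
--             # 모든 인원이 들어간 팀
--             else:
--                 return_dict[f"{i}팀"] = members[0:num_of_people]
--                 del members[0:num_of_people]
--
--     return return_dict
-- ===== SOURCE B (Python) =====
-- def originate(members, count_of_team, num_of_people, lack_of_people):
--     """Team partition computed by one slicing pass over the original list with a
--     running start index (no repeated deletion); equivalence is about the return
--     value, and the same net mutation of `members` is performed at the end."""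
--     c, n, lack = count_of_team, num_of_people, lack_of_people
--     regular = range(1, c + 1) if lack == 0 else range(1, c)
--     result = {}
--     start = 0
--     for i in regular:
--         size = n - 1 if lack != 0 and i >= c - lack else n
--         result[f"{i}팀"] = members[start:start + size]
--         start = min(start + size, len(members))
--     if lack != 0 and c >= 1:
--         result[f"{c}팀"] = members[start:]
--     del members[0:start]
--     return result
-- ===== Notes on version B (the rewrite author's own statement) =====
-- stated objective: alternative
-- what changed: B replaces A's destructive loop (repeatedly slicing and deleting the front of members with three interleaved branches and a break) by first choosing the regular team indices, then one pass that slices the untouched list at a running start offset, assigning the last team the remaining tail when lack_of_people != 0, with a single final deletion reproducing the net mutation.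
import Mathlib
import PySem

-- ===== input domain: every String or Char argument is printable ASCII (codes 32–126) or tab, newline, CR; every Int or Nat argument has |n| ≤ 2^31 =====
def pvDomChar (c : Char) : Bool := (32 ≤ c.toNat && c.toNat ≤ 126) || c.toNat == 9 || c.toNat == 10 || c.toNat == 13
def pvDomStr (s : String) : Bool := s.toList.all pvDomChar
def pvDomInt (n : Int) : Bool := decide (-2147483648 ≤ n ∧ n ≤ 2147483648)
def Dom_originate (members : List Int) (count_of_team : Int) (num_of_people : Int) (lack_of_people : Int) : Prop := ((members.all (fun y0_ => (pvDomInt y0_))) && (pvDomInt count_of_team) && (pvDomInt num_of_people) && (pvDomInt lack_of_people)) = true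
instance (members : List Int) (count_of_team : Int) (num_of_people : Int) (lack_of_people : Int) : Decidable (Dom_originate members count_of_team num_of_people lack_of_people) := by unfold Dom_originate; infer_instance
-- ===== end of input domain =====

-- B replaces A's destructive loop (slice-and-delete the front of `members` with three
-- interleaved branches and a break) by one non-destructive slicing pass at a running start
-- offset; equivalence is about the RETURN value (both Pythons leave `members` in the same
-- final state, though A aliases the last team's list where B stores a copy).

-- ===== PORT A =====
-- The loop over range(1, count_of_team+1); `del members[0:k]` leaves exactly the suffix
-- members[k:], ported (exactly) as PySem.List.slice members (some k) none.
def originateLoopA (c n lack : Int) (is : List Int) (members : List Int)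
    (d : PySem.Dict String (List Int)) : PySem.Dict String (List Int) :=
  match is with
  | [] => d
  | i :: rest =>
    if lack = 0 then
      originateLoopA c n lack rest (PySem.List.slice members (some n) none)
        (d.insert (PySem.Int.toStr i ++ "팀") (PySem.List.slice members (some 0) (some n)))
    else if i = c then
      -- last team takes everything, then break
      d.insert (PySem.Int.toStr i ++ "팀") members
    else if c - lack ≤ i then
      originateLoopA c n lack rest (PySem.List.slice members (some (n - 1)) none)
        (d.insert (PySem.Int.toStr i ++ "팀") (PySem.List.slice members (some 0) (some (n - 1))))
    else
      originateLoopA c n lack rest (PySem.List.slice members (some n) none)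
        (d.insert (PySem.Int.toStr i ++ "팀") (PySem.List.slice members (some 0) (some n)))

def originate (members : List Int) (count_of_team : Int) (num_of_people : Int) (lack_of_people : Int) : List (String × List Int) :=
  (originateLoopA count_of_team num_of_people lack_of_people
      (PySem.List.pyRange 1 (count_of_team + 1) 1) members PySem.Dict.empty).items

-- ===== PORT B =====
-- one iteration of B's single pass: slice at the running start, advance (clamped to len)
def originateStepB (members : List Int) (c n lack : Int)
    (st : PySem.Dict String (List Int) × Int) (i : Int) :
    PySem.Dict String (List Int) × Int :=
  let size := if lack ≠ 0 ∧ c - lack ≤ i then n - 1 else n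
  (st.1.insert (PySem.Int.toStr i ++ "팀")
      (PySem.List.slice members (some st.2) (some (st.2 + size))),
   min (st.2 + size) (members.length : Int))

def originate_alt (members : List Int) (count_of_team : Int) (num_of_people : Int) (lack_of_people : Int) : List (String × List Int) :=
  let regular := if lack_of_people = 0 then PySem.List.pyRange 1 (count_of_team + 1) 1
                 else PySem.List.pyRange 1 count_of_team 1
  let p := regular.foldl (originateStepB members count_of_team num_of_people lack_of_people)
             (PySem.Dict.empty, (0 : Int))
  let d := if lack_of_people ≠ 0 ∧ 1 ≤ count_of_team then
             p.1.insert (PySem.Int.toStr count_of_team ++ "팀")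
               (PySem.List.slice members (some p.2) none)
           else p.1
  d.items

-- ===== PRECONDITION & SPEC =====
-- Pre_ restricts to the task's natural domain of nonnegative team sizes (num_of_people ≥ 0,
-- and ≥ 1 when lack_of_people ≠ 0, since then teams of size num_of_people-1 are carved);
-- outside it A still returns, but its values come from Python's negative-slice wraparound
-- on a shrinking list, an accident of the delete-the-front implementation.
def Pre_originate (members : List Int) (count_of_team : Int) (num_of_people : Int) (lack_of_people : Int) : Prop :=
  0 ≤ num_of_people ∧ (lack_of_people ≠ 0 → 1 ≤ num_of_people)
instance (members : List Int) (count_of_team : Int) (num_of_people : Int) (lack_of_people : Int) : Decidable (Pre_originate members count_of_team num_of_people lack_of_people) := by unfold Pre_originate; infer_instance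

def pvWitness_originate : List Int × Int × Int × Int := ([1, 2, 3, 4, 5], 2, 3, 1)

def Spec_originate (members : List Int) (count_of_team : Int) (num_of_people : Int) (lack_of_people : Int) (out : List (String × List Int)) : Prop := out = originate_alt members count_of_team num_of_people lack_of_people
instance (members : List Int) (count_of_team : Int) (num_of_people : Int) (lack_of_people : Int) (out : List (String × List Int)) : Decidable (Spec_originate members count_of_team num_of_people lack_of_people out) := by unfold Spec_originate; infer_instance

-- ===== CLAIM (what is proved, stated in full; the proofs are below) =====
def Claim_equal_originate : Prop := ∀ (members : List Int) (count_of_team : Int) (num_of_people : Int) (lack_of_people : Int), Dom_originate members count_of_team num_of_people lack_of_people → Pre_originate members count_of_team num_of_people lack_of_people → Spec_originate members count_of_team num_of_people lack_of_people (originate members count_of_team num_of_people lack_of_people)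

-- ===== LEMMAS AND PROOFS =====

-- members[0:sz] of the remaining suffix = members[start:start+sz] of the original list
lemma slice_drop_eq (orig : List Int) (start sz : Int) (h0 : 0 ≤ start) (hs : 0 ≤ sz) :
    PySem.List.slice (orig.drop start.toNat) (some 0) (some sz)
      = PySem.List.slice orig (some start) (some (start + sz)) := by
  rw [PySem.List.slice_zero_start, PySem.List.slice_to _ hs,
      PySem.List.slice_toNat _ h0 (by omega)]
  congr 1
  omega

-- deleting the first sz of the remaining suffix = dropping the clamped new start
lemma drop_next_eq (orig : List Int) (start sz : Int) (h0 : 0 ≤ start)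
    (hl : start ≤ (orig.length : Int)) (hs : 0 ≤ sz) :
    PySem.List.slice (orig.drop start.toNat) (some sz) none
      = orig.drop (min (start + sz) (orig.length : Int)).toNat := by
  rw [PySem.List.slice_from _ hs, List.drop_drop]
  by_cases h : start + sz ≤ (orig.length : Int)
  · rw [min_eq_left h]
    congr 1
    omega
  · rw [min_eq_right (by omega)]
    rw [List.drop_eq_nil_of_le (by omega), List.drop_eq_nil_of_le (by omega)]

lemma min_start_nonneg (orig : List Int) (start sz : Int) (h0 : 0 ≤ start) (hs : 0 ≤ sz) :
    0 ≤ min (start + sz) (orig.length : Int) ∧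
      min (start + sz) (orig.length : Int) ≤ (orig.length : Int) := by
  constructor <;> omega

-- lack_of_people = 0: both loops take members[start:start+n] for every team index
lemma loop_zero (orig : List Int) (c n : Int) (hn : 0 ≤ n) (is : List Int) :
    ∀ (d : PySem.Dict String (List Int)) (start : Int),
      0 ≤ start → start ≤ (orig.length : Int) →
      originateLoopA c n 0 is (orig.drop start.toNat) d
        = (is.foldl (originateStepB orig c n 0) (d, start)).1 := by
  induction is with
  | nil => intro d start _ _; simp [originateLoopA]
  | cons i rest ih =>
    intro d start h0 hl
    obtain ⟨h1, h2⟩ := min_start_nonneg orig start n h0 hn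
    simp only [originateLoopA, if_pos rfl, List.foldl_cons, originateStepB, ne_eq,
      not_true_eq_false, false_and, if_false]
    rw [slice_drop_eq orig start n h0 hn, drop_next_eq orig start n h0 hl hn]
    exact ih _ _ h1 h2

-- lack_of_people ≠ 0: the regular teams agree step by step, and the last team (A's break)
-- gets exactly the remaining suffix, i.e. B's members[start:]
lemma loop_pos (orig : List Int) (c n lack : Int) (hlack : lack ≠ 0) (hn : 1 ≤ n)
    (is : List Int) :
    ∀ (d : PySem.Dict String (List Int)) (start : Int),
      (∀ i ∈ is, i ≠ c) → 0 ≤ start → start ≤ (orig.length : Int) →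
      originateLoopA c n lack (is ++ [c]) (orig.drop start.toNat) d
        = ((is.foldl (originateStepB orig c n lack) (d, start)).1).insert
            (PySem.Int.toStr c ++ "팀")
            (PySem.List.slice orig (some (is.foldl (originateStepB orig c n lack) (d, start)).2) none) := by
  induction is with
  | nil =>
    intro d start _ h0 _
    simp only [List.nil_append, List.foldl_nil]
    simp only [originateLoopA, if_neg hlack]
    rw [PySem.List.slice_from _ h0]
    simp
  | cons i rest ih =>
    intro d start hne h0 hl
    have hic : i ≠ c := hne i (by simp)
    have hrest : ∀ j ∈ rest, j ≠ c := fun j hj => hne j (by simp [hj])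
    by_cases hci : c - lack ≤ i
    · have hs : (0 : Int) ≤ n - 1 := by omega
      obtain ⟨h1, h2⟩ := min_start_nonneg orig start (n - 1) h0 hs
      simp only [List.cons_append, originateLoopA, if_neg hlack, if_neg hic, if_pos hci,
        List.foldl_cons, originateStepB, ne_eq, hlack, not_false_eq_true, true_and,
        if_pos hci]
      rw [slice_drop_eq orig start (n - 1) h0 hs, drop_next_eq orig start (n - 1) h0 hl hs]
      exact ih _ _ hrest h1 h2
    · obtain ⟨h1, h2⟩ := min_start_nonneg orig start n h0 (by omega)
      simp only [List.cons_append, originateLoopA, if_neg hlack, if_neg hic, if_neg hci,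
        List.foldl_cons, originateStepB, ne_eq, hlack, not_false_eq_true, true_and,
        if_neg hci]
      rw [slice_drop_eq orig start n h0 (by omega), drop_next_eq orig start n h0 hl (by omega)]
      exact ih _ _ hrest h1 h2

-- ===== VERDICT (by name: the statement is the Claim_ definition above) =====
theorem originate_spec : Claim_equal_originate := by
  intro members c n lack _ hpre
  unfold Spec_originate originate originate_alt
  by_cases hlack : lack = 0
  · subst hlack
    simp only [if_pos rfl, ne_eq, not_true_eq_false, false_and, if_false]
    have h := congrArg PySem.Dict.items (loop_zero members c n hpre.1
      (PySem.List.pyRange 1 (c + 1) 1) PySem.Dict.empty 0 le_rfl (by positivity))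
    simpa using h
  · have hn : 1 ≤ n := hpre.2 hlack
    by_cases hc : 1 ≤ c
    · have hsplit : PySem.List.pyRange 1 (c + 1) 1
          = PySem.List.pyRange 1 c 1 ++ [c] := by
        rw [PySem.List.pyRange_one_append 1 c (c + 1) hc (by omega),
          PySem.List.pyRange_one_singleton]
      have hne : ∀ i ∈ PySem.List.pyRange 1 c 1, i ≠ c := by
        intro i hi
        have := (PySem.List.mem_pyRange_one.mp hi).2
        omega
      have h := loop_pos members c n lack hlack hn (PySem.List.pyRange 1 c 1)
        PySem.Dict.empty 0 hne le_rfl (by positivity)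
      simp only [if_neg hlack, ne_eq, hlack, not_false_eq_true, true_and, if_pos hc]
      rw [hsplit]
      simpa using congrArg PySem.Dict.items h
    · have h1 : PySem.List.pyRange 1 (c + 1) 1 = [] :=
        PySem.List.pyRange_one_eq_nil (by omega)
      have h2 : PySem.List.pyRange 1 c 1 = [] :=
        PySem.List.pyRange_one_eq_nil (by omega)
      simp [h1, h2, hlack, hc, originateLoopA]
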